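-- pv_equiv track=rewrite | github.com/kylelmorris/emdb.client.epmc_annotation | emdb.client.epmc_annotation.py | parse_filter_expression
-- ===== SOURCE A (Python) =====
-- def parse_filter_expression(expr: str) -> str:
--     if "=" in expr and not any(op in expr for op in (">", "<")):
--         f, v = expr.split("=", 1)
--         return f"{f}:{v}"
--     if ">=" in expr:
--         f, v = expr.split(">=", 1)
--         return f"{f}:[{v} TO *]"
--     if "<=" in expr:
--         f, v = expr.split("<=", 1)
--         return f"{f}:[* TO {v}]"
--     if ">" in expr:
--         f, v = expr.split(">", 1)
--         return f"{f}:[{v} TO *]"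
--     if "<" in expr:
--         f, v = expr.split("<", 1)
--         return f"{f}:[* TO {v}]"
--     return expr
-- ===== SOURCE B (Python) =====
-- def parse_filter_expression(expr: str) -> str:
--     # One left-to-right character scan recording the first index of each operator
--     # ('>', '<', '=', and the two-char '>=' / '<='), then a slice-based rebuild.
--     i_gt = i_lt = i_eq = i_ge = i_le = None
--     for i, c in enumerate(expr):
--         if c == '>':
--             if i_gt is None:
--                 i_gt = i
--             if i_ge is None and i + 1 < len(expr) and expr[i + 1] == '=':
--                 i_ge = i
--         elif c == '<':
--             if i_lt is None:
--                 i_lt = i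
--             if i_le is None and i + 1 < len(expr) and expr[i + 1] == '=':
--                 i_le = i
--         elif c == '=':
--             if i_eq is None:
--                 i_eq = i
--     if i_eq is not None and i_gt is None and i_lt is None:
--         return expr[:i_eq] + ':' + expr[i_eq + 1:]
--     if i_ge is not None:
--         return expr[:i_ge] + ':[' + expr[i_ge + 2:] + ' TO *]'
--     if i_le is not None:
--         return expr[:i_le] + ':[* TO ' + expr[i_le + 2:] + ']'
--     if i_gt is not None:
--         return expr[:i_gt] + ':[' + expr[i_gt + 1:] + ' TO *]'
--     if i_lt is not None:
--         return expr[:i_lt] + ':[* TO ' + expr[i_lt + 1:] + ']'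
--     return expr
-- ===== Notes on version B (the rewrite author's own statement) =====
-- stated objective: alternative
-- what changed: Replaced A's repeated substring-membership tests and split calls by a single left-to-right character scan that records the first index of each one- and two-character comparison operator, followed by index-arithmetic slicing to build the result.
import Mathlib
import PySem

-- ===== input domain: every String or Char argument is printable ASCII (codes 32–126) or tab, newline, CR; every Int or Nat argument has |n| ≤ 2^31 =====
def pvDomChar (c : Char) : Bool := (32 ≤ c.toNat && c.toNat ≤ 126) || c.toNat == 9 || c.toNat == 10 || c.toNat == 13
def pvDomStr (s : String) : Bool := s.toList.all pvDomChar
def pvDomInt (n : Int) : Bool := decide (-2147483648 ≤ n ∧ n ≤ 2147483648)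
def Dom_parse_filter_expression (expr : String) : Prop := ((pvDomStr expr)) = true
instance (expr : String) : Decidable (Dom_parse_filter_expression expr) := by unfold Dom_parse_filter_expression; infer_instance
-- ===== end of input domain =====

-- B replaces A's repeated substring tests ('op in expr') and split calls by ONE character scan
-- recording the first-occurrence index of each of '>', '<', '=', '>=', '<=', then rebuilds the
-- result by index slicing (objective: alternative; same behaviour on every input).

-- ===== PORT A =====
-- each branch: 'f, v = expr.split(op, 1)' — the guard guarantees exactly two pieces, so the
-- non-matching arm is unreachable ('' stands for the impossible ValueError path)
def parse_filter_expression (expr : String) : String :=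
  if PySem.Str.isIn "=" expr && !(PySem.Str.isIn ">" expr || PySem.Str.isIn "<" expr) then
    match PySem.Str.splitMax? expr "=" 1 with
    | some (f :: v :: _) => f ++ ":" ++ v
    | none => ""
    | some [] => ""
    | some [_] => ""
  else if PySem.Str.isIn ">=" expr then
    match PySem.Str.splitMax? expr ">=" 1 with
    | some (f :: v :: _) => f ++ ":[" ++ v ++ " TO *]"
    | none => ""
    | some [] => ""
    | some [_] => ""
  else if PySem.Str.isIn "<=" expr then
    match PySem.Str.splitMax? expr "<=" 1 with
    | some (f :: v :: _) => f ++ ":[* TO " ++ v ++ "]"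
    | none => ""
    | some [] => ""
    | some [_] => ""
  else if PySem.Str.isIn ">" expr then
    match PySem.Str.splitMax? expr ">" 1 with
    | some (f :: v :: _) => f ++ ":[" ++ v ++ " TO *]"
    | none => ""
    | some [] => ""
    | some [_] => ""
  else if PySem.Str.isIn "<" expr then
    match PySem.Str.splitMax? expr "<" 1 with
    | some (f :: v :: _) => f ++ ":[* TO " ++ v ++ "]"
    | none => ""
    | some [] => ""
    | some [_] => ""
  else expr


-- ===== PORT B =====
-- Source B's 'for i, c in enumerate(expr)' loop: structural recursion over the characters carrying
-- the index i and the five first-index accumulators; the lookahead 'i + 1 < len(expr) and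
-- expr[i+1] == "="' is 'rest.head? = some '='' on the remaining characters.
def pfeScan : List Char → Nat → Option Nat → Option Nat → Option Nat → Option Nat → Option Nat →
    Option Nat × Option Nat × Option Nat × Option Nat × Option Nat
  | [], _, i_gt, i_lt, i_eq, i_ge, i_le => (i_gt, i_lt, i_eq, i_ge, i_le)
  | c :: rest, i, i_gt, i_lt, i_eq, i_ge, i_le =>
    if c = '>' then
      pfeScan rest (i + 1)
        (if i_gt = none then some i else i_gt) i_lt i_eq
        (if i_ge = none ∧ rest.head? = some '=' then some i else i_ge) i_le
    else if c = '<' then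
      pfeScan rest (i + 1)
        i_gt (if i_lt = none then some i else i_lt) i_eq
        i_ge (if i_le = none ∧ rest.head? = some '=' then some i else i_le)
    else if c = '=' then
      pfeScan rest (i + 1) i_gt i_lt (if i_eq = none then some i else i_eq) i_ge i_le
    else
      pfeScan rest (i + 1) i_gt i_lt i_eq i_ge i_le


-- Source B's return chain: the slices 'expr[:k]', 'expr[k+1:]', 'expr[k+2:]' (all indices
-- nonnegative) are take/drop on the character list
def pfeDispatch (cs : List Char) :
    Option Nat × Option Nat × Option Nat × Option Nat × Option Nat → List Char
  | (i_gt, i_lt, i_eq, i_ge, i_le) =>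
    match i_eq, i_gt, i_lt with
    | some k, none, none => cs.take k ++ ':' :: cs.drop (k + 1)
    | _, _, _ =>
      match i_ge with
      | some k => cs.take k ++ (':' :: '[' :: cs.drop (k + 2)) ++ (' ' :: 'T' :: 'O' :: ' ' :: '*' :: ']' :: [])
      | none =>
        match i_le with
        | some k => cs.take k ++ (':' :: '[' :: '*' :: ' ' :: 'T' :: 'O' :: ' ' :: cs.drop (k + 2)) ++ (']' :: [])
        | none =>
          match i_gt with
          | some k => cs.take k ++ (':' :: '[' :: cs.drop (k + 1)) ++ (' ' :: 'T' :: 'O' :: ' ' :: '*' :: ']' :: [])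
          | none =>
            match i_lt with
            | some k => cs.take k ++ (':' :: '[' :: '*' :: ' ' :: 'T' :: 'O' :: ' ' :: cs.drop (k + 1)) ++ (']' :: [])
            | none => cs

def parse_filter_expression_alt (expr : String) : String :=
  String.ofList (pfeDispatch expr.toList (pfeScan expr.toList 0 none none none none none))


-- ===== PRECONDITION & SPEC =====
def Spec_parse_filter_expression (expr : String) (out : String) : Prop := out = parse_filter_expression_alt expr
instance (expr : String) (out : String) : Decidable (Spec_parse_filter_expression expr out) := by unfold Spec_parse_filter_expression; infer_instance

-- ===== CLAIM (what is proved, stated in full; the proofs are below) =====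
def Claim_equal_parse_filter_expression : Prop := ∀ (expr : String), Dom_parse_filter_expression expr → Spec_parse_filter_expression expr (parse_filter_expression expr)

-- ===== LEMMAS AND PROOFS =====

-- first index at which sep occurs as a prefix of the corresponding suffix (none = no occurrence)
def pfeFm (sep : List Char) : List Char → Option Nat
  | [] => if sep.isPrefixOf [] then some 0 else none
  | c :: rest => if sep.isPrefixOf (c :: rest) then some 0 else (pfeFm sep rest).map (· + 1)

theorem pfeFm_isSome_iff (sep l : List Char) :
    (pfeFm sep l).isSome = true ↔ ∃ j, sep <+: l.drop j := by
  induction l with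
  | nil =>
    constructor
    · intro h
      refine ⟨0, ?_⟩
      by_cases hp : sep.isPrefixOf ([] : List Char)
      · simpa [List.isPrefixOf_iff_prefix] using hp
      · simp [pfeFm, hp] at h
    · rintro ⟨j, hj⟩
      simp at hj
      simp [pfeFm, hj]
  | cons c rest ih =>
    by_cases hp : sep.isPrefixOf (c :: rest)
    · simp [pfeFm, hp]
      exact ⟨0, by simpa [List.isPrefixOf_iff_prefix] using hp⟩
    · have he : pfeFm sep (c :: rest) = (pfeFm sep rest).map (· + 1) := by
        simp [pfeFm, hp]
      rw [he, Option.isSome_map, ih]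
      constructor
      · rintro ⟨j, hj⟩; exact ⟨j + 1, by simpa using hj⟩
      · rintro ⟨j, hj⟩
        cases j with
        | zero => simp at hj; rw [List.isPrefixOf_iff_prefix] at hp; exact absurd hj hp
        | succ j => exact ⟨j, by simpa using hj⟩

theorem pfeFm_isIn (sep l : List Char) :
    PySem.Chars.isIn sep l = (pfeFm sep l).isSome := by
  by_cases h : (pfeFm sep l).isSome = true
  · rw [h, ← PySem.Chars.exists_prefix_drop_iff_isIn]
    exact (pfeFm_isSome_iff sep l).1 h
  · simp only [Bool.not_eq_true] at h
    rw [h, PySem.Chars.isIn_eq_false_iff]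
    intro hinf
    obtain ⟨pre, suf, hps⟩ := hinf
    have : ∃ j, sep <+: l.drop j := ⟨pre.length, by rw [← hps]; simp⟩
    rw [← pfeFm_isSome_iff] at this
    simp [h] at this

theorem pfeFm_pair_none (a b : Char) (l : List Char) (h : pfeFm [a] l = none) :
    pfeFm [a, b] l = none := by
  induction l with
  | nil => simp [pfeFm, List.isPrefixOf]
  | cons c rest ih =>
    by_cases hc : a = c
    · simp [pfeFm, List.isPrefixOf, hc] at h
    · simp [pfeFm, List.isPrefixOf, hc] at h ⊢
      exact ih h

theorem pfe_go_m0 (sep : List Char) (fuel : Nat) (l cur : List Char) (acc : List (List Char)) :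
    PySem.Chars.splitOnMax.go sep fuel 0 l cur acc = ((cur.reverse ++ l) :: acc).reverse := by
  cases fuel with
  | zero => simp [PySem.Chars.splitOnMax.go]
  | succ f => cases l with
    | nil => simp [PySem.Chars.splitOnMax.go]
    | cons c rest => simp [PySem.Chars.splitOnMax.go]

theorem pfe_go_m1 (sep : List Char) (hsep : sep ≠ []) :
    ∀ (l : List Char) (fuel : Nat) (cur : List Char) (acc : List (List Char)),
      l.length < fuel →
      PySem.Chars.splitOnMax.go sep fuel 1 l cur acc =
        (match pfeFm sep l with
         | some k => acc.reverse ++ [cur.reverse ++ l.take k, l.drop (k + sep.length)]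
         | none => acc.reverse ++ [cur.reverse ++ l]) := by
  intro l
  induction l with
  | nil =>
    intro fuel cur acc hf
    cases fuel with
    | zero => omega
    | succ f =>
      have : ¬ sep.isPrefixOf ([] : List Char) = true := by
        cases sep with
        | nil => exact absurd rfl hsep
        | cons a s => simp [List.isPrefixOf]
      simp [PySem.Chars.splitOnMax.go, pfeFm, this]
  | cons c rest ih =>
    intro fuel cur acc hf
    cases fuel with
    | zero => omega
    | succ f =>
      by_cases hp : sep.isPrefixOf (c :: rest) = true
      · simp only [PySem.Chars.splitOnMax.go, hp, if_true]
        rw [pfe_go_m0]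
        simp [pfeFm, hp]
      · simp only [PySem.Chars.splitOnMax.go, hp]
        rw [ih f (c :: cur) acc (by simp at hf ⊢; omega)]
        have he : pfeFm sep (c :: rest) = (pfeFm sep rest).map (· + 1) := by
          simp [pfeFm, hp]
        rw [he]
        cases pfeFm sep rest with
        | none => simp
        | some k => simp [List.take_succ_cons, List.drop_succ_cons, Nat.add_right_comm]

theorem pfe_splitOnMax_one (sep : List Char) (hsep : sep ≠ []) (l : List Char) :
    PySem.Chars.splitOnMax l sep 1 =
      (match pfeFm sep l with
       | some k => [l.take k, l.drop (k + sep.length)]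
       | none => [l]) := by
  unfold PySem.Chars.splitOnMax
  norm_num
  rw [pfe_go_m1 sep hsep l (l.length + 1) [] [] (by omega)]
  cases pfeFm sep l <;> simp

def pfeUpd (i : Nat) (o r : Option Nat) : Option Nat :=
  match o with
  | some k => some k
  | none => r.map (· + i)

theorem pfeUpd_comp (i : Nat) (o r : Option Nat) :
    pfeUpd (i + 1) o r = pfeUpd i o (r.map (· + 1)) := by
  cases o <;> cases r <;> (simp [pfeUpd]; try omega)

theorem pfeUpd_set (i : Nat) (o X : Option Nat) :
    pfeUpd (i + 1) (if o = none then some i else o) X = pfeUpd i o (some 0) := by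
  cases o <;> simp [pfeUpd]

theorem pfeFm_single_cons (a c : Char) (rest : List Char) :
    pfeFm [a] (c :: rest) = if a = c then some 0 else (pfeFm [a] rest).map (· + 1) := by
  by_cases h : a = c <;> simp [pfeFm, List.isPrefixOf, h]

theorem pfeFm_pair_cons (a c : Char) (rest : List Char) :
    pfeFm [a, '='] (c :: rest) =
      if a = c ∧ rest.head? = some '=' then some 0 else (pfeFm [a, '='] rest).map (· + 1) := by
  cases rest with
  | nil => by_cases h : a = c <;> simp [pfeFm, List.isPrefixOf, h]
  | cons r rs =>
    by_cases h : a = c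
    · by_cases hr : r = '='
      · simp [pfeFm, List.isPrefixOf, h, hr]
      · have hr' : ¬('=' = r) := fun hh => hr hh.symm
        simp [pfeFm, List.isPrefixOf, h, hr, hr']
    · simp [pfeFm, List.isPrefixOf, h]

theorem pfeScan_spec (cs : List Char) :
    ∀ (i : Nat) (g l e ge le : Option Nat),
      pfeScan cs i g l e ge le =
        (pfeUpd i g (pfeFm ['>'] cs), pfeUpd i l (pfeFm ['<'] cs), pfeUpd i e (pfeFm ['='] cs),
         pfeUpd i ge (pfeFm ['>', '='] cs), pfeUpd i le (pfeFm ['<', '='] cs)) := by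
  induction cs with
  | nil =>
    intro i g l e ge le
    simp [pfeScan, pfeFm, List.isPrefixOf, pfeUpd]
    cases g <;> cases l <;> cases e <;> cases ge <;> cases le <;> simp
  | cons c rest ih =>
    intro i g l e ge le
    rw [pfeFm_single_cons '>' c rest, pfeFm_single_cons '<' c rest, pfeFm_single_cons '=' c rest,
        pfeFm_pair_cons '>' c rest, pfeFm_pair_cons '<' c rest]
    by_cases hgt : c = '>'
    · simp only [pfeScan, hgt, Char.reduceEq, reduceIte]
      rw [ih]
      by_cases hh : rest.head? = some '=' <;>
        simp [hh, pfeUpd_set, ← pfeUpd_comp]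
    · by_cases hlt : c = '<'
      · simp only [pfeScan, hlt, Char.reduceEq, reduceIte]
        rw [ih]
        by_cases hh : rest.head? = some '=' <;>
          simp [hh, pfeUpd_set, ← pfeUpd_comp]
      · by_cases heq : c = '='
        · simp only [pfeScan, heq, Char.reduceEq, reduceIte]
          rw [ih]
          simp [pfeUpd_set, ← pfeUpd_comp]
        · simp only [pfeScan, hgt, hlt, heq, reduceIte]
          rw [ih]
          have h1 : ¬('>' = c) := fun hx => hgt hx.symm
          have h2 : ¬('<' = c) := fun hx => hlt hx.symm
          have h3 : ¬('=' = c) := fun hx => heq hx.symm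
          simp [h1, h2, h3, ← pfeUpd_comp]

theorem pfeUpd_zero_none (r : Option Nat) : pfeUpd 0 none r = r := by
  cases r <;> simp [pfeUpd]

theorem pfe_strIn (op expr : String) : PySem.Str.isIn op expr = (pfeFm op.toList expr.toList).isSome := by
  simp [PySem.Str.isIn, pfeFm_isIn]

theorem pfe_split (expr op : String) (hop : op.toList ≠ []) :
    PySem.Str.splitMax? expr op 1 = some
      ((match pfeFm op.toList expr.toList with
        | some k => [expr.toList.take k, expr.toList.drop (k + op.toList.length)]
        | none => [expr.toList]).map String.ofList) := by
  simp [PySem.Str.splitMax?, PySem.Chars.splitMax?, List.isEmpty_iff, hop,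
    pfe_splitOnMax_one _ hop]

theorem pfe_glue_eq (a b : List Char) :
    String.ofList a ++ ":" ++ String.ofList b = String.ofList (a ++ ':' :: b) := by
  simp only [show (":" : String) = String.ofList [':'] from rfl, ← String.ofList_append,
    List.append_assoc, List.cons_append, List.nil_append]

theorem pfe_glue_gt (a b : List Char) :
    String.ofList a ++ ":[" ++ String.ofList b ++ " TO *]" =
      String.ofList (a ++ (':' :: '[' :: b) ++ (' ' :: 'T' :: 'O' :: ' ' :: '*' :: ']' :: [])) := by
  simp only [show (":[" : String) = String.ofList [':', '['] from rfl,
    show (" TO *]" : String) = String.ofList [' ', 'T', 'O', ' ', '*', ']'] from rfl,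
    ← String.ofList_append, List.append_assoc, List.cons_append, List.nil_append]

theorem pfe_glue_lt (a b : List Char) :
    String.ofList a ++ ":[* TO " ++ String.ofList b ++ "]" =
      String.ofList (a ++ (':' :: '[' :: '*' :: ' ' :: 'T' :: 'O' :: ' ' :: b) ++ (']' :: [])) := by
  simp only [show (":[* TO " : String) = String.ofList [':', '[', '*', ' ', 'T', 'O', ' '] from rfl,
    show ("]" : String) = String.ofList [']'] from rfl,
    ← String.ofList_append, List.append_assoc, List.cons_append, List.nil_append]

theorem parse_filter_expression_spec' (expr : String) :
    parse_filter_expression expr = parse_filter_expression_alt expr := by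
  unfold parse_filter_expression parse_filter_expression_alt
  rw [pfeScan_spec]
  simp only [pfeUpd_zero_none]
  rw [pfe_strIn "=", pfe_strIn ">", pfe_strIn "<", pfe_strIn ">=", pfe_strIn "<=",
      pfe_split expr "=" (by decide), pfe_split expr ">=" (by decide),
      pfe_split expr "<=" (by decide), pfe_split expr ">" (by decide),
      pfe_split expr "<" (by decide)]
  cases hG : pfeFm ['>'] expr.toList with
  | none =>
    have hGE : pfeFm ['>', '='] expr.toList = none := pfeFm_pair_none _ _ _ hG
    cases hL : pfeFm ['<'] expr.toList with
    | none =>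
      have hLE : pfeFm ['<', '='] expr.toList = none := pfeFm_pair_none _ _ _ hL
      cases hE : pfeFm ['='] expr.toList with
      | none => simp [pfeDispatch, hG, hL, hE, hGE, hLE]
      | some k => simp [pfeDispatch, hG, hL, hE, pfe_glue_eq]
    | some kl =>
      cases hLE : pfeFm ['<', '='] expr.toList with
      | none => simp [pfeDispatch, hG, hL, hGE, hLE, pfe_glue_lt]
      | some kle => simp [pfeDispatch, hG, hL, hGE, hLE, pfe_glue_lt]
  | some kg =>
    cases hGE : pfeFm ['>', '='] expr.toList with
    | none =>
      cases hL : pfeFm ['<'] expr.toList with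
      | none =>
        have hLE : pfeFm ['<', '='] expr.toList = none := pfeFm_pair_none _ _ _ hL
        simp [pfeDispatch, hG, hL, hGE, hLE, pfe_glue_gt]
      | some kl =>
        cases hLE : pfeFm ['<', '='] expr.toList with
        | none => simp [pfeDispatch, hG, hL, hGE, hLE, pfe_glue_gt]
        | some kle => simp [pfeDispatch, hG, hL, hGE, hLE, pfe_glue_lt]
    | some kge => simp [pfeDispatch, hG, hGE, pfe_glue_gt]

-- ===== VERDICT (by name: the statement is the Claim_ definition above) =====
theorem parse_filter_expression_spec : Claim_equal_parse_filter_expression := by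
  intro expr _
  unfold Spec_parse_filter_expression
  exact parse_filter_expression_spec' expr
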